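-- pv_equiv track=rewrite | github.com/razz-jj/smartparking-lot-management-system | main.py.py | get_next_free_slot
-- ===== SOURCE A (Python) =====
-- TOTAL_SLOTS = 10
--
-- VIP_SLOTS = {1, 2}
--
-- def get_next_free_slot(slots, is_vip=False):
--     if is_vip:
--         for s in sorted(VIP_SLOTS):
--             if slots[s] is None:
--                 return s
--         return None
--
--     for s in range(1, TOTAL_SLOTS + 1):
--         if s not in VIP_SLOTS and slots[s] is None:
--             return s
--
--     for s in sorted(VIP_SLOTS):
--         if slots[s] is None:
--             return s
--
--     return None
-- ===== SOURCE B (Python) =====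
-- TOTAL_SLOTS = 10
--
-- VIP_SLOTS = {1, 2}
--
-- _VIP_MAX = max(VIP_SLOTS)
--
-- def _succ(s):
--     """Next slot in priority order, or None when exhausted: the regular band
--     _VIP_MAX+1..TOTAL_SLOTS wraps into the VIP band 1.._VIP_MAX, which ends the walk."""
--     if s > _VIP_MAX:
--         return s + 1 if s < TOTAL_SLOTS else 1
--     return s + 1 if s < _VIP_MAX else None
--
-- def get_next_free_slot(slots, is_vip=False):
--     s = 1 if is_vip else _VIP_MAX + 1
--     while s is not None:
--         if slots[s] is None:
--             return s
--         s = _succ(s)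
--     return None
-- ===== Notes on version B (the rewrite author's own statement) =====
-- stated objective: alternative
-- what changed: Replaces A's three staged scans over collections (range and sorted VIP set with membership tests) by one circular walk driven by an arithmetic successor function over the slot bands; the VIP flag only selects the entry slot.
import Mathlib
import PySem

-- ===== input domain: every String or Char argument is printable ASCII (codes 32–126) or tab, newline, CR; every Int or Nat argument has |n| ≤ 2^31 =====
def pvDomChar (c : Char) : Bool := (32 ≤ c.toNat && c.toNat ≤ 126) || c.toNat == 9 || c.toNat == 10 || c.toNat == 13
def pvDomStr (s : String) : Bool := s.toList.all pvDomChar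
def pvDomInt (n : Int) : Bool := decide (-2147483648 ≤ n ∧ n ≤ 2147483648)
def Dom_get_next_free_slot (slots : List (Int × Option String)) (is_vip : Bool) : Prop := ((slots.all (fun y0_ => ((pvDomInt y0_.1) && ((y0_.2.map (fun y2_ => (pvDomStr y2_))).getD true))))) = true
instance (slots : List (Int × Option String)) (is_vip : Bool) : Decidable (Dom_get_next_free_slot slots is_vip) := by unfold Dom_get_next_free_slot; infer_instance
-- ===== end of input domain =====

-- B replaces A's three staged scans over collections (range / sorted set with membership
-- tests) by a single circular walk driven by an arithmetic successor function; the VIP flag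
-- only chooses the entry slot (objective: alternative, not claimed faster).

-- ===== PORT A =====
-- sorted(VIP_SLOTS) = [1, 2] (literal set {1, 2})
def pvVipSorted : List Int := [1, 2]

-- 'slots[s] is None'; a missing key raises KeyError in Python, there the port's loop just
-- moves on — Pre_get_next_free_slot excludes exactly the inputs where that access happens.
def pvFree (slots : List (Int × Option String)) (s : Int) : Bool :=
  PySem.Dict.get? (PySem.Dict.ofList slots) s == some none

-- 'for s in sorted(VIP_SLOTS): if slots[s] is None: return s' / fall through
def pvLoopVip (slots : List (Int × Option String)) : List Int → Option Int
  | [] => none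
  | s :: rest => if pvFree slots s then some s else pvLoopVip slots rest

-- 'for s in range(1, TOTAL_SLOTS + 1): if s not in VIP_SLOTS and slots[s] is None: return s'
def pvLoopRange (slots : List (Int × Option String)) : List Int → Option Int
  | [] => none
  | s :: rest =>
    if ¬ (s ∈ pvVipSorted) ∧ pvFree slots s then some s else pvLoopRange slots rest

def get_next_free_slot (slots : List (Int × Option String)) (is_vip : Bool) : Option Int :=
  if is_vip then
    pvLoopVip slots pvVipSorted
  else
    match pvLoopRange slots (PySem.List.pyRange 1 (10 + 1) 1) with
    | some s => some s
    | none => pvLoopVip slots pvVipSorted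

-- ===== PORT B =====
-- _VIP_MAX = max(VIP_SLOTS)
def pvVipMax : Int := 2

-- '_succ(s)': next slot in priority order, or none when the walk is exhausted
def pvSucc (s : Int) : Option Int :=
  if s > pvVipMax then (if s < 10 then some (s + 1) else some 1)
  else if s < pvVipMax then some (s + 1) else none

-- 'while s is not None: …'; the walk visits each slot at most once (≤ 12 states reachable
-- from either entry), so a step counter of 12 makes the same loop total without ever
-- running out on a reachable state ('slots[s] is None' as in port A).
def pvWalk (slots : List (Int × Option String)) : Nat → Int → Option Int
  | 0, _ => none
  | k + 1, s =>
    if pvFree slots s then some s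
    else
      match pvSucc s with
      | none => none
      | some s' => pvWalk slots k s'

def get_next_free_slot_alt (slots : List (Int × Option String)) (is_vip : Bool) : Option Int :=
  pvWalk slots 12 (if is_vip then 1 else pvVipMax + 1)

-- ===== PRECONDITION & SPEC =====
-- Pre_ holds exactly when Python A returns: scanning A's access order, every slot key
-- inspected before the first free one (or all of them, if none is free) is present in the
-- dict; otherwise A raises KeyError (and so does B, whose walk probes the same keys).
def Pre_get_next_free_slot (slots : List (Int × Option String)) (is_vip : Bool) : Prop :=
  let order : List Int := if is_vip then [1, 2] else [3, 4, 5, 6, 7, 8, 9, 10, 1, 2]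
  let d := PySem.Dict.ofList slots
  ∀ i : Fin order.length,
    (∀ j : Fin order.length, (j : Nat) < (i : Nat) → PySem.Dict.get? d (order.get j) ≠ some none) →
    (PySem.Dict.get? d (order.get i)).isSome

instance (slots : List (Int × Option String)) (is_vip : Bool) : Decidable (Pre_get_next_free_slot slots is_vip) := by
  unfold Pre_get_next_free_slot; infer_instance

def pvWitness_get_next_free_slot : (List (Int × Option String)) × Bool :=
  ([(1, some "car"), (2, some "van"), (3, none), (4, some "x"), (5, none),
    (6, none), (7, some "y"), (8, none), (9, none), (10, none)], false)

def Spec_get_next_free_slot (slots : List (Int × Option String)) (is_vip : Bool) (out : Option Int) : Prop := out = get_next_free_slot_alt slots is_vip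
instance (slots : List (Int × Option String)) (is_vip : Bool) (out : Option Int) : Decidable (Spec_get_next_free_slot slots is_vip out) := by unfold Spec_get_next_free_slot; infer_instance

-- ===== CLAIM (what is proved, stated in full; the proofs are below) =====
def Claim_equal_get_next_free_slot : Prop := ∀ (slots : List (Int × Option String)) (is_vip : Bool), Dom_get_next_free_slot slots is_vip → Pre_get_next_free_slot slots is_vip → Spec_get_next_free_slot slots is_vip (get_next_free_slot slots is_vip)

-- ===== LEMMAS AND PROOFS =====
-- (the two ports in fact agree on EVERY input: both probe the same slots in the same order;
-- the Pre_ hypothesis is carried by the claim because the PYTHONS only agree inside it)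

theorem pvWalk_step (slots : List (Int × Option String)) (k : Nat) (s s' : Int)
    (h : pvSucc s = some s') :
    pvWalk slots (k + 1) s = if pvFree slots s then some s else pvWalk slots k s' := by
  simp [pvWalk, h]

theorem pvWalk_end (slots : List (Int × Option String)) (k : Nat) (s : Int)
    (h : pvSucc s = none) :
    pvWalk slots (k + 1) s = if pvFree slots s then some s else none := by
  simp [pvWalk, h]

theorem pvLoopRange_skip (slots : List (Int × Option String)) (s : Int) (rest : List Int)
    (h : s ∈ pvVipSorted) :
    pvLoopRange slots (s :: rest) = pvLoopRange slots rest := by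
  simp [pvLoopRange, h]

theorem pvLoopRange_step (slots : List (Int × Option String)) (s : Int) (rest : List Int)
    (h : ¬ (s ∈ pvVipSorted)) :
    pvLoopRange slots (s :: rest)
      = if pvFree slots s then some s else pvLoopRange slots rest := by
  by_cases hf : pvFree slots s <;> simp [pvLoopRange, h, hf]

theorem pvRange_eval : PySem.List.pyRange 1 (10 + 1) 1 = [1, 2, 3, 4, 5, 6, 7, 8, 9, 10] := by
  decide

-- ===== VERDICT (by name: the statement is the Claim_ definition above) =====
theorem get_next_free_slot_spec : Claim_equal_get_next_free_slot := by
  intro slots is_vip _ _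
  unfold Spec_get_next_free_slot
  cases is_vip with
  | true =>
    show pvLoopVip slots pvVipSorted = pvWalk slots 12 1
    rw [pvWalk_step slots 11 1 2 (by decide), pvWalk_end slots 10 2 (by decide)]
    by_cases h1 : pvFree slots 1 <;> by_cases h2 : pvFree slots 2 <;>
      simp [pvLoopVip, pvVipSorted, h1, h2]
  | false =>
    show (match pvLoopRange slots (PySem.List.pyRange 1 (10 + 1) 1) with
      | some s => some s
      | none => pvLoopVip slots pvVipSorted) = pvWalk slots 12 3
    rw [pvRange_eval,
      pvLoopRange_skip slots 1 _ (by decide), pvLoopRange_skip slots 2 _ (by decide),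
      pvLoopRange_step slots 3 _ (by decide), pvLoopRange_step slots 4 _ (by decide),
      pvLoopRange_step slots 5 _ (by decide), pvLoopRange_step slots 6 _ (by decide),
      pvLoopRange_step slots 7 _ (by decide), pvLoopRange_step slots 8 _ (by decide),
      pvLoopRange_step slots 9 _ (by decide), pvLoopRange_step slots 10 _ (by decide),
      pvWalk_step slots 11 3 4 (by decide), pvWalk_step slots 10 4 5 (by decide),
      pvWalk_step slots 9 5 6 (by decide), pvWalk_step slots 8 6 7 (by decide),
      pvWalk_step slots 7 7 8 (by decide), pvWalk_step slots 6 8 9 (by decide),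
      pvWalk_step slots 5 9 10 (by decide), pvWalk_step slots 4 10 1 (by decide),
      pvWalk_step slots 3 1 2 (by decide), pvWalk_end slots 2 2 (by decide)]
    by_cases h3 : pvFree slots 3
    · simp only [if_pos h3]
    · simp only [if_neg h3]
      by_cases h4 : pvFree slots 4
      · simp only [if_pos h4]
      · simp only [if_neg h4]
        by_cases h5 : pvFree slots 5
        · simp only [if_pos h5]
        · simp only [if_neg h5]
          by_cases h6 : pvFree slots 6
          · simp only [if_pos h6]
          · simp only [if_neg h6]
            by_cases h7 : pvFree slots 7
            · simp only [if_pos h7]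
            · simp only [if_neg h7]
              by_cases h8 : pvFree slots 8
              · simp only [if_pos h8]
              · simp only [if_neg h8]
                by_cases h9 : pvFree slots 9
                · simp only [if_pos h9]
                · simp only [if_neg h9]
                  by_cases h10 : pvFree slots 10
                  · simp only [if_pos h10]
                  · simp only [if_neg h10]; rfl
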